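-- pv_equiv track=rewrite | github.com/FranCamposC/Indoor_positioning | src/accionNew.py | get_stable_value
-- ===== SOURCE A (Python) =====
-- from collections import deque, Counter
--
-- WINDOW_SIZE = 5
--
-- def get_stable_value(window, window_ts):
--     if len(window) < WINDOW_SIZE:
--         return None, None
--     val, _ = Counter(window).most_common(1)[0]
--     # devolvemos la primera aparición de ese valor en la ventana
--     for v, t in zip(window, window_ts):
--         if v == val:
--             return val, t
--     return None, None
-- ===== SOURCE B (Python) =====
-- WINDOW_SIZE = 5
--
-- def get_stable_value(window, window_ts):
--     if len(window) < WINDOW_SIZE: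
--         return None, None
--     # scan indices; a candidate is a first occurrence; keep the one whose
--     # full-window multiplicity is strictly greater (earliest wins ties,
--     # matching Counter.most_common's insertion-order tie-break)
--     best_i = 0
--     for i in range(1, len(window)):
--         if window[i] not in window[:i] and window.count(window[i]) > window.count(window[best_i]):
--             best_i = i
--     if best_i < len(window_ts):
--         return window[best_i], window_ts[best_i]
--     return None, None
-- ===== Notes on version B (the rewrite author's own statement) =====
-- stated objective: alternative
-- what changed: Drops the Counter and the zip rescan entirely: B runs an index loop that considers only first-occurrence positions (membership test against the prefix window[:i]) and keeps the index whose full-window count is strictly greater, then indexes the timestamp list directly; no counting structure is built.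
import Mathlib
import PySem

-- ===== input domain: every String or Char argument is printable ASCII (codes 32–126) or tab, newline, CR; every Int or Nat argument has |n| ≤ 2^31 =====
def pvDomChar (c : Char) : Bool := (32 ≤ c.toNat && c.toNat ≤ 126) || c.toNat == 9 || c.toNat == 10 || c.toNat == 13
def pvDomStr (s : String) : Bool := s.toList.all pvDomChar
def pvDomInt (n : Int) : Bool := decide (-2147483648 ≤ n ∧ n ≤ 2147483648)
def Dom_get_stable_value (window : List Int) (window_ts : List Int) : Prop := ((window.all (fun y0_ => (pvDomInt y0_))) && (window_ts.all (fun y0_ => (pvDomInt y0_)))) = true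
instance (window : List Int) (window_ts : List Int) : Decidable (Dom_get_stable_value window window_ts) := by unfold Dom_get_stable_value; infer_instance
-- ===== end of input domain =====

-- B replaces A's Counter + most_common + zip rescan with an index loop over the window
-- that keeps the first-occurrence index of strictly greatest full-window count, then
-- indexes the timestamp list directly; alternative decomposition, same exact results.

-- ===== PORT A =====
-- the early-return 'for v, t in zip(window, window_ts)' loop of A
def pvZipFindA (val : Int) : List (Int × Int) → Option Int × Option Int
  | [] => (none, none)
  | (v, t) :: rest => if v == val then (some val, some t) else pvZipFindA val rest

def get_stable_value (window : List Int) (window_ts : List Int) : Option Int × Option Int :=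
  if window.length < 5 then (none, none)
  else
    -- Counter(window).most_common(1)[0]: items sorted by count, reverse=True (stable), head
    match PySem.List.sorted (PySem.Dict.counter window).items (fun p => p.2) true with
    | [] => (none, none)  -- unreachable: window has ≥ 5 elements (Python would raise IndexError)
    | (val, _) :: _ => pvZipFindA val (window.zip window_ts)

-- ===== PORT B =====
-- the body of B's 'for i in range(1, len(window))' loop
def pvStepB (window : List Int) (bi i : Int) : Int :=
  if (!((PySem.List.slice window (some 0) (some i)).contains (PySem.List.pyGetD window i 0))
      && decide (PySem.List.count window (PySem.List.pyGetD window bi 0)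
                   < PySem.List.count window (PySem.List.pyGetD window i 0)))
  then i else bi

def get_stable_value_alt (window : List Int) (window_ts : List Int) : Option Int × Option Int :=
  if window.length < 5 then (none, none)
  else
    let best_i := (PySem.List.pyRange 1 (window.length : Int) 1).foldl (pvStepB window) 0
    if best_i < (window_ts.length : Int) then
      (some (PySem.List.pyGetD window best_i 0), PySem.List.pyGet? window_ts best_i)
    else (none, none)

-- ===== PRECONDITION & SPEC =====
def Spec_get_stable_value (window : List Int) (window_ts : List Int) (out : Option Int × Option Int) : Prop := out = get_stable_value_alt window window_ts
instance (window : List Int) (window_ts : List Int) (out : Option Int × Option Int) : Decidable (Spec_get_stable_value window window_ts out) := by unfold Spec_get_stable_value; infer_instance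

-- ===== CLAIM (what is proved, stated in full; the proofs are below) =====
def Claim_equal_get_stable_value : Prop := ∀ (window : List Int) (window_ts : List Int), Dom_get_stable_value window window_ts → Spec_get_stable_value window window_ts (get_stable_value window window_ts)

-- ===== LEMMAS AND PROOFS =====

-- head of an insertBy (descending comparator) step = running-max step
theorem pv_head?_insertBy {α : Type} (key : α → Int) (x : α) (s : List α) :
    (PySem.List.insertBy (fun a b => decide (key b < key a)) x s).head? =
      some (match s.head? with
            | none => x
            | some m => if key m < key x then x else m) := by
  cases s with
  | nil => rfl
  | cons y ys =>
    by_cases h : key y < key x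
    · simp [PySem.List.insertBy, h]
    · simp [PySem.List.insertBy, h]

-- max? of a list with one element appended = one running-max step
theorem pv_max?_append {α : Type} (key : α → Int) (xs : List α) (x : α) :
    PySem.List.max? (xs ++ [x]) key
      = match PySem.List.max? xs key with
        | none => some x
        | some m => if key m < key x then some x else some m := by
  simp only [PySem.List.max?, List.foldl_append, List.foldl_cons, List.foldl_nil]
  rfl

-- the first element of Python's stable reverse-sorted list is the first maximal element
theorem pv_head?_sorted_rev {α : Type} (key : α → Int) (xs : List α) :
    (PySem.List.sorted xs key true).head? = PySem.List.max? xs key := by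
  induction xs using List.reverseRecOn with
  | nil => rfl
  | append_singleton xs x ih =>
    have hsorted : PySem.List.sorted (xs ++ [x]) key true
        = PySem.List.insertBy (fun a b => decide (key b < key a)) x
            (PySem.List.sorted xs key true) := by
      simp [PySem.List.sorted, List.foldl_append]
    rw [hsorted, pv_head?_insertBy, ih, pv_max?_append]
    cases hm : PySem.List.max? xs key with
    | none => rfl
    | some m => by_cases h : key m < key x <;> simp [h]

-- max? of a mapped list
theorem pv_max?_map {α β : Type} (f : α → β) (key : β → Int) (l : List α) :
    PySem.List.max? (l.map f) key = (PySem.List.max? l (fun x => key (f x))).map f := by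
  simp only [PySem.List.max?, List.foldl_map]
  have H : ∀ (l : List α) (acc : Option α),
      l.foldl (fun a x => match a with
        | none => some (f x)
        | some m => if key m < key (f x) then some (f x) else some m) (acc.map f)
      = (l.foldl (fun a x => match a with
        | none => some x
        | some m => if key (f m) < key (f x) then some x else some m) acc).map f := by
    intro l
    induction l with
    | nil => intro acc; rfl
    | cons z l ih =>
      intro acc
      cases acc with
      | none => simpa using ih (some z)
      | some m =>
        by_cases h : key (f m) < key (f z)
        · simpa [h] using ih (some z)
        · simpa [h] using ih (some m)
  simpa using H l none

-- index of the head of the suffix, when it does not occur in the prefix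
theorem pv_idxOf_append_cons (xs rest : List Int) (x : Int) (h : x ∉ xs) :
    (xs ++ x :: rest).idxOf x = xs.length := by
  induction xs with
  | nil => simp
  | cons a l ih =>
    have hax : (a == x) = false := by
      simp only [beq_eq_false_iff_ne]; intro hh; exact h (hh ▸ List.mem_cons_self)
    simp only [List.cons_append, List.idxOf_cons, hax, List.length_cons, cond_false]
    rw [ih (fun hm => h (List.mem_cons_of_mem a hm))]

-- A's zip scan for the first occurrence of val, as an index lookup
theorem pv_zipFindA_eq (val : Int) (vs : List Int) (h : val ∈ vs) : ∀ ts : List Int,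
    pvZipFindA val (vs.zip ts) =
      if vs.idxOf val < ts.length then (some val, ts[vs.idxOf val]?) else (none, none) := by
  induction vs with
  | nil => cases h
  | cons v vs ih =>
    intro ts
    cases ts with
    | nil => simp [pvZipFindA]
    | cons t ts =>
      by_cases hv : v = val
      · subst hv
        simp [pvZipFindA, List.idxOf_cons_self]
      · have h' : val ∈ vs := by
          rcases List.mem_cons.1 h with h1 | h1
          · exact absurd h1.symm hv
          · exact h1
        have hne : (v == val) = false := by simp [hv]
        have hidx : (v :: vs).idxOf val = vs.idxOf val + 1 := by
          simp [List.idxOf_cons, hne]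
        rw [List.zip_cons_cons]
        simp only [pvZipFindA, hne, Bool.false_eq_true, if_false]
        rw [ih h' ts, hidx]
        by_cases hlt : vs.idxOf val < ts.length
        · simp [hlt, Nat.succ_lt_succ hlt]
        · simp [hlt]

-- invariant of B's loop: after scanning indices 1..j-1, best_i is the first-occurrence
-- index of the first count-maximal value of the prefix window.take j
theorem pv_loopB_inv (window : List Int) (j : Nat) (h1 : 1 ≤ j) (hj : j ≤ window.length) :
    ∃ k, PySem.List.max? (PySem.Set.ofList (window.take j))
            (fun k => ((window.count k : Int))) = some k ∧
         k ∈ window.take j ∧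
         (PySem.List.pyRange 1 (j : Int) 1).foldl (pvStepB window) 0
            = ((window.idxOf k : Int)) := by
  induction j with
  | zero => omega
  | succ j ih =>
    by_cases hj1 : j = 0
    · subst hj1
      have hlen : 0 < window.length := by omega
      obtain ⟨a, rest, rfl⟩ : ∃ a rest, window = a :: rest := by
        cases window with
        | nil => simp at hlen
        | cons a rest => exact ⟨a, rest, rfl⟩
      refine ⟨a, ?_, ?_, ?_⟩
      · simp [PySem.Set.ofList_cons, PySem.Set.discard, PySem.List.max?]
      · simp
      · simp [PySem.List.pyRange_one_eq_nil, List.idxOf_cons_self]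
    · have h1j : 1 ≤ j := by omega
      have hjlt : j < window.length := by omega
      obtain ⟨k, hmax, hkmem, hfold⟩ := ih h1j (le_of_lt hjlt)
      have hkwin : k ∈ window := List.mem_of_mem_take hkmem
      have hkidx : window.idxOf k < window.length := List.idxOf_lt_length_of_mem hkwin
      have htake : window.take (j+1) = window.take j ++ [window[j]] := by
        rw [List.take_add_one]
        simp [List.getElem?_eq_getElem hjlt]
      have hrange : PySem.List.pyRange 1 ((j+1 : Nat) : Int) 1
          = PySem.List.pyRange 1 (j : Int) 1 ++ [(j : Int)] := by
        have : ((j+1 : Nat) : Int) = (j : Int) + 1 := by push_cast; ring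
        rw [this, PySem.List.pyRange_one_succ_right (by exact_mod_cast h1j)]
      -- values read by the step at index j
      have hgetj : PySem.List.pyGetD window ((j : Nat) : Int) 0 = window[j] := by
        rw [PySem.List.pyGetD_natCast]
        simp [List.getD, List.getElem?_eq_getElem hjlt]
      have hgetk : PySem.List.pyGetD window ((window.idxOf k : Nat) : Int) 0 = k := by
        rw [PySem.List.pyGetD_natCast]
        simp [List.getD, List.getElem?_eq_getElem hkidx, List.getElem_idxOf hkidx]
      have hslice : PySem.List.slice window (some 0) (some ((j : Nat) : Int)) = window.take j := by
        have h0 : ((0 : Nat) : Int) = (0 : Int) := rfl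
        rw [← h0, PySem.List.slice_natCast]
        simp
      rw [hrange, List.foldl_append, List.foldl_cons, List.foldl_nil, hfold, htake]
      by_cases hmem : window[j] ∈ window.take j
      · -- not a first occurrence: both sides unchanged
        have hc : (window.take j).contains window[j] = true := by
          simpa [List.contains_iff_mem] using hmem
        have hset : PySem.Set.ofList (window.take j ++ [window[j]])
            = PySem.Set.ofList (window.take j) := by
          rw [PySem.Set.ofList_append_singleton,
            PySem.Set.add_of_mem ((PySem.Set.mem_ofList _ _).2 hmem)]
        refine ⟨k, by rw [hset]; exact hmax, List.mem_append_left _ hkmem, ?_⟩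
        unfold pvStepB
        rw [hgetj, hslice, hc]
        simp
      · -- first occurrence at index j: one running-max step
        have hc : (window.take j).contains window[j] = false := by
          simpa [List.contains_iff_mem] using hmem
        have hset : PySem.Set.ofList (window.take j ++ [window[j]])
            = PySem.Set.ofList (window.take j) ++ [window[j]] := by
          rw [PySem.Set.ofList_append_singleton,
            PySem.Set.add_of_not_mem (by rw [PySem.Set.mem_ofList]; exact hmem)]
        have hmax' := pv_max?_append (fun k => ((window.count k : Int)))
          (PySem.Set.ofList (window.take j)) window[j]
        rw [hmax] at hmax'
        have hidxj : window.idxOf window[j] = j := by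
          have hw : window.take j ++ window[j] :: window.drop (j+1) = window := by
            conv_rhs => rw [← List.take_append_drop j window]
            congr 1
            exact (List.drop_eq_getElem_cons hjlt).symm
          have h2 := pv_idxOf_append_cons (window.take j) (window.drop (j+1)) window[j] hmem
          rw [hw] at h2
          rw [h2, List.length_take]
          omega
        by_cases hlt : window.count k < window.count window[j]
        · refine ⟨window[j], ?_, List.mem_append_right _ List.mem_cons_self, ?_⟩
          · rw [hset, hmax']
            simp [hlt]
          · unfold pvStepB
            rw [hgetj, hgetk, hslice, hc, hidxj]
            simp [hlt]
        · refine ⟨k, ?_, List.mem_append_left _ hkmem, ?_⟩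
          · rw [hset, hmax']
            simp [hlt]
          · unfold pvStepB
            rw [hgetj, hgetk, hslice, hc]
            simp [hlt]

theorem pv_main (window window_ts : List Int) :
    get_stable_value window window_ts = get_stable_value_alt window window_ts := by
  unfold get_stable_value get_stable_value_alt
  by_cases hlen : window.length < 5
  · simp [hlen]
  · simp only [hlen, if_false]
    have h1 : 1 ≤ window.length := by omega
    obtain ⟨k0, hmax, hkmem, hfold⟩ := pv_loopB_inv window window.length h1 le_rfl
    rw [List.take_length] at hmax hkmem
    have hA : (PySem.List.sorted (PySem.Dict.counter window).items (fun p => p.2) true).head?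
        = some (k0, ((window.count k0 : Int))) := by
      rw [pv_head?_sorted_rev, PySem.Dict.items_counter, pv_max?_map, hmax]
      rfl
    have hkidx : window.idxOf k0 < window.length := List.idxOf_lt_length_of_mem hkmem
    have hget : PySem.List.pyGetD window ((window.idxOf k0 : Nat) : Int) 0 = k0 := by
      rw [PySem.List.pyGetD_natCast]
      simp [List.getD, List.getElem?_eq_getElem hkidx, List.getElem_idxOf hkidx]
    cases hs : PySem.List.sorted (PySem.Dict.counter window).items (fun p => p.2) true with
    | nil => rw [hs] at hA; exact absurd hA (by simp)
    | cons hd tl =>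
      rw [hs, List.head?_cons, Option.some_inj] at hA
      obtain ⟨v0, c0⟩ := hd
      cases hA
      show pvZipFindA k0 (window.zip window_ts) = _
      rw [hfold, pv_zipFindA_eq k0 window hkmem window_ts, hget, PySem.List.pyGet?_natCast]
      simp only [Nat.cast_lt]

-- ===== VERDICT (by name: the statement is the Claim_ definition above) =====
theorem get_stable_value_spec : Claim_equal_get_stable_value := by
  intro window window_ts _
  unfold Spec_get_stable_value
  exact pv_main window window_ts
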